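-- pv_equiv track=rewrite | github.com/pypi-data/pypi-mirror-217 | packages/xpath-localizer/xpath-localizer-1.0.4.tar.gz/xpath-localizer-1.0.4/xploc/analyze.py | get_hitcount
-- ===== SOURCE A (Python) =====
-- def get_hitcount(path,properties,p):
--     count = 0
--     for prop in properties:
--         value = properties[prop]
--         for p0 in p:
--             if value == p[p0]:
--                 count += 1
--                 #print (f"\"{value}\" found in {p0}/{path}")
--     return count
-- ===== SOURCE B (Python) =====
-- def get_hitcount(path, properties, p):
--     # same return value as the nested-scan version, via two frequency tables
--     c1 = {}
--     for v in properties.values():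
--         c1[v] = c1.get(v, 0) + 1
--     c2 = {}
--     for v in p.values():
--         c2[v] = c2.get(v, 0) + 1
--     count = 0
--     for v, n in c1.items():
--         count += n * c2.get(v, 0)
--     return count
-- ===== Notes on version B (the rewrite author's own statement) =====
-- stated objective: faster
-- what changed: Replaced the nested scan of both dicts by building a frequency table of each dict's values and summing count1[v]*count2[v] over the distinct values of the first table.
import Mathlib
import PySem

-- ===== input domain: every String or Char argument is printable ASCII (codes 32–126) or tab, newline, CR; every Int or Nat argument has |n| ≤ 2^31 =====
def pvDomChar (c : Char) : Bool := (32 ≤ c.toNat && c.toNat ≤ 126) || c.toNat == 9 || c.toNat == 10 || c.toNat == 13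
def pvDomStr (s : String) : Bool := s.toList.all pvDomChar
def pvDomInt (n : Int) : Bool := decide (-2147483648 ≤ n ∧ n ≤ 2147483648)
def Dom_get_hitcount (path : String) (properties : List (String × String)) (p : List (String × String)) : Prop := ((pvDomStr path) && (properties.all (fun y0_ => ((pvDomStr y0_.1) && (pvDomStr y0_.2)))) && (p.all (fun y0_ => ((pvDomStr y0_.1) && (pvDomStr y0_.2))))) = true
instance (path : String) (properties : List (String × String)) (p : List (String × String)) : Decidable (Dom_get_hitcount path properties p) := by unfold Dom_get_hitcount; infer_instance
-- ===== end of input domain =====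

-- B replaces A's nested scan over both dicts by two value-frequency tables and one pass
-- over the first table's distinct values (count1[v]*count2[v]) — asymptotically faster.


-- ===== PORT A =====
-- for prop in properties: value = properties[prop]; for p0 in p: if value == p[p0]: count += 1
-- (properties[prop] with prop a key of the dict never raises; ported as getD "" — exact here)
def get_hitcount (path : String) (properties : List (String × String)) (p : List (String × String)) : Int :=
  let dprops := PySem.Dict.ofList properties
  let dp := PySem.Dict.ofList p
  dprops.keys.foldl (fun count prop =>
    let value := dprops.getD prop ""
    dp.keys.foldl (fun count p0 =>
      if value == dp.getD p0 "" then count + 1 else count) count) 0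

-- ===== PORT B =====
def get_hitcount_alt (path : String) (properties : List (String × String)) (p : List (String × String)) : Int :=
  let c1 := (PySem.Dict.ofList properties).values.foldl (fun d v => d.modify v 0 (· + 1)) PySem.Dict.empty
  let c2 := (PySem.Dict.ofList p).values.foldl (fun d v => d.modify v 0 (· + 1)) PySem.Dict.empty
  c1.items.foldl (fun count kv => count + kv.2 * c2.getD kv.1 0) 0

-- ===== PRECONDITION & SPEC =====
def Spec_get_hitcount (path : String) (properties : List (String × String)) (p : List (String × String)) (out : Int) : Prop := out = get_hitcount_alt path properties p
instance (path : String) (properties : List (String × String)) (p : List (String × String)) (out : Int) : Decidable (Spec_get_hitcount path properties p out) := by unfold Spec_get_hitcount; infer_instance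

-- ===== CLAIM (what is proved, stated in full; the proofs are below) =====
def Claim_equal_get_hitcount : Prop := ∀ (path : String) (properties : List (String × String)) (p : List (String × String)), Dom_get_hitcount path properties p → Spec_get_hitcount path properties p (get_hitcount path properties p)

-- ===== LEMMAS AND PROOFS =====

-- folding over a dict's keys while looking each key up = folding over the paired values
theorem foldl_fst_getD {g : Int → String → Int} (d : PySem.Dict String String)
    (l : List (String × String)) (h : ∀ kv ∈ l, d.getD kv.1 "" = kv.2) (init : Int) :
    (l.map Prod.fst).foldl (fun c k => g c (d.getD k "")) init = (l.map Prod.snd).foldl g init := by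
  induction l generalizing init with
  | nil => simp
  | cons kv rest ih =>
      simp only [List.map_cons, List.foldl_cons]
      rw [h kv (by simp), ih (fun kv' h' => h kv' (by simp [h']))]

theorem keys_eq_map_fst (d : PySem.Dict String String) : d.keys = d.items.map Prod.fst := by
  cases d; simp [PySem.Dict.keys]

theorem values_eq_map_snd (d : PySem.Dict String String) : d.values = d.items.map Prod.snd := by
  cases d; simp [PySem.Dict.values]

-- A's inner loop counts the occurrences of `value` among the dict's values
theorem inner_eq (d : PySem.Dict String String) (hnd : d.keys.Nodup) (value : String) (count : Int) :
    d.keys.foldl (fun c k => if value == d.getD k "" then c + 1 else c) count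
      = count + (d.values.count value : Int) := by
  rw [keys_eq_map_fst,
    foldl_fst_getD (g := fun c w => if value == w then c + 1 else c) d d.items
      (fun kv hkv => PySem.Dict.getD_of_mem_items d (by simpa using hkv) hnd ""),
    ← values_eq_map_snd, PySem.List.foldl_count_if]
  congr 1
  norm_cast
  rw [List.count]
  exact List.countP_congr (fun w _ => by simp [BEq.comm])

-- A = sum over properties' values of the count of that value among p's values
theorem A_eq (path : String) (props p : List (String × String)) :
    get_hitcount path props p
      = (((PySem.Dict.ofList props).values).map
          (fun v => (((PySem.Dict.ofList p).values).count v : Int))).sum := by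
  unfold get_hitcount
  simp only
  have h1 : ∀ count prop,
      (PySem.Dict.ofList p).keys.foldl
        (fun c k => if (PySem.Dict.ofList props).getD prop "" == (PySem.Dict.ofList p).getD k "" then c + 1 else c) count
      = count + (((PySem.Dict.ofList p).values).count ((PySem.Dict.ofList props).getD prop "") : Int) :=
    fun count prop => inner_eq _ (PySem.Dict.nodup_keys_ofList p) _ count
  calc (PySem.Dict.ofList props).keys.foldl _ 0
      = (PySem.Dict.ofList props).keys.foldl
          (fun count prop => count + (((PySem.Dict.ofList p).values).count ((PySem.Dict.ofList props).getD prop "") : Int)) 0 := by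
        exact PySem.List.foldl_congr_mem _ _ _ 0 (fun c k _ => h1 c k)
    _ = _ := by
        rw [keys_eq_map_fst,
          foldl_fst_getD (g := fun c v => c + (((PySem.Dict.ofList p).values).count v : Int)) _ _
            (fun kv hkv => PySem.Dict.getD_of_mem_items _ (by simpa using hkv) (PySem.Dict.nodup_keys_ofList props) ""),
          ← values_eq_map_snd, PySem.List.foldl_add, zero_add]

-- B = sum over the distinct values of properties of count1(v) * count2(v)
theorem B_eq (path : String) (props p : List (String × String)) :
    get_hitcount_alt path props p
      = ((PySem.Set.ofList ((PySem.Dict.ofList props).values)).map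
          (fun v => ((((PySem.Dict.ofList props).values).count v : Int))
                    * (((PySem.Dict.ofList p).values).count v : Int))).sum := by
  unfold get_hitcount_alt
  simp only [← PySem.Dict.counter_eq_foldl]
  rw [PySem.Dict.items_counter, List.foldl_map, PySem.List.foldl_add, zero_add]
  congr 1
  refine List.map_congr_left (fun v hv => ?_)
  simp [PySem.Dict.getD_counter]

-- the table identity: Σ_{x∈xs} f x = Σ_{v distinct in xs} count(v) * f v
theorem sum_count_mul (xs : List String) (f : String → Int) :
    (xs.map f).sum
      = ((PySem.Set.ofList xs).map (fun v => ((xs.count v : Int)) * f v)).sum := by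
  rw [Finset.sum_list_map_count]
  have hfin : (PySem.Set.ofList xs).toFinset = xs.toFinset := by
    ext v; simp [PySem.Set.mem_ofList]
  rw [← List.sum_toFinset _ (PySem.Set.nodup_ofList xs), hfin]
  refine Finset.sum_congr rfl (fun v _ => ?_)
  push_cast [nsmul_eq_mul]
  ring

-- ===== VERDICT (by name: the statement is the Claim_ definition above) =====
theorem get_hitcount_spec : Claim_equal_get_hitcount := by
  intro path props p _
  unfold Spec_get_hitcount
  rw [A_eq, B_eq, sum_count_mul]
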